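-- pv_equiv track=rewrite | github.com/ognjhunt/BlueprintCapture | scripts/validate_launch_readiness.py | readiness_stage
-- ===== SOURCE A (Python) =====
-- def readiness_stage(failures: list[str]) -> str:
--     if not failures:
--         return "ready"
--     if any("must be set in" in failure or "still contains a placeholder" in failure for failure in failures):
--         return "release_config_blocked"
--     if any(
--         failure.startswith("contract_only proof")
--         or failure.startswith("ops/launch-readiness/example.launch-proof.json")
--         or failure.startswith("real launch proof")
--         or "contains placeholder proof text" in failure
--         or failure.startswith("evidence.")
--         or failure.startswith("proof city_slug")
--         or failure.startswith("city.")
--         or failure.startswith("capture.")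
--         or failure.startswith("pipeline.")
--         or failure.startswith("meta_glasses.")
--         or failure.startswith("open_capture.")
--         or failure.startswith("payouts.")
--         or failure.startswith("ops.")
--         for failure in failures
--     ):
--         return "proof_artifact_blocked"
--     if any("required for live" in failure for failure in failures):
--         return "live_inputs_blocked"
--     if any("placeholder for live route checks" in failure or "decimal coordinate" in failure for failure in failures):
--         return "live_inputs_blocked"
--     if any("live route checks skipped" in failure for failure in failures):
--         return "proof_artifact_blocked"
--     return "live_route_blocked"
-- ===== SOURCE B (Python) =====
-- _PROOF_PREFIXES = (
--     "contract_only proof",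
--     "ops/launch-readiness/example.launch-proof.json",
--     "real launch proof",
-- )
-- _PROOF_PREFIXES_TAIL = (
--     "evidence.",
--     "proof city_slug",
--     "city.",
--     "capture.",
--     "pipeline.",
--     "meta_glasses.",
--     "open_capture.",
--     "payouts.",
--     "ops.",
-- )
--
--
-- def _rank(failure):
--     """Lowest-numbered priority tier this single failure matches (6 = none)."""
--     if "must be set in" in failure or "still contains a placeholder" in failure:
--         return 1
--     if (
--         failure.startswith(_PROOF_PREFIXES)
--         or "contains placeholder proof text" in failure
--         or failure.startswith(_PROOF_PREFIXES_TAIL)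
--     ):
--         return 2
--     if "required for live" in failure:
--         return 3
--     if "placeholder for live route checks" in failure or "decimal coordinate" in failure:
--         return 4
--     if "live route checks skipped" in failure:
--         return 5
--     return 6
--
--
-- def readiness_stage(failures: list[str]) -> str:
--     if not failures:
--         return "ready"
--     best = 6
--     for failure in failures:
--         best = min(best, _rank(failure))
--     return (
--         "release_config_blocked"
--         if best == 1
--         else "proof_artifact_blocked"
--         if best == 2 or best == 5
--         else "live_inputs_blocked"
--         if best == 3 or best == 4
--         else "live_route_blocked"
--     )
-- ===== Notes on version B (the rewrite author's own statement) =====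
-- stated objective: simpler
-- what changed: Replaces A's five separate any-scans over the whole list with one classification pass that computes each failure's lowest-matching priority tier and keeps the minimum rank, then maps that rank to its stage.
import Mathlib
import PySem

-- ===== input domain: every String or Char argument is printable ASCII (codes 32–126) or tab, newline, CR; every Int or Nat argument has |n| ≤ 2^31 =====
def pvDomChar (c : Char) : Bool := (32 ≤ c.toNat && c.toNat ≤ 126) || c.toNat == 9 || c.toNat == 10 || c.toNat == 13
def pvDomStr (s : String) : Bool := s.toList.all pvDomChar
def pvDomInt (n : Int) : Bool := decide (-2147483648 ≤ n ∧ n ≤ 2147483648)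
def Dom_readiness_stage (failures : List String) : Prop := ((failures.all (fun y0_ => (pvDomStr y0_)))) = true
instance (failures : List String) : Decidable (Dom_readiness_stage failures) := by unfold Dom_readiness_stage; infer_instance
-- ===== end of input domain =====

-- one honest line: B replaces A's five repeated any-scans by one pass keeping the minimum
-- priority rank per failure, then a rank→stage table; objective: simpler decomposition.

-- ===== PORT A =====  (literal transliteration: the chain of `any` scans, in A's order)
def readiness_stage (failures : List String) : String :=
  if failures = [] then "ready"
  else if failures.any (fun failure =>
      PySem.Str.isIn "must be set in" failure || PySem.Str.isIn "still contains a placeholder" failure) then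
    "release_config_blocked"
  else if failures.any (fun failure =>
      PySem.Str.startswith failure "contract_only proof"
      || PySem.Str.startswith failure "ops/launch-readiness/example.launch-proof.json"
      || PySem.Str.startswith failure "real launch proof"
      || PySem.Str.isIn "contains placeholder proof text" failure
      || PySem.Str.startswith failure "evidence."
      || PySem.Str.startswith failure "proof city_slug"
      || PySem.Str.startswith failure "city."
      || PySem.Str.startswith failure "capture."
      || PySem.Str.startswith failure "pipeline."
      || PySem.Str.startswith failure "meta_glasses."
      || PySem.Str.startswith failure "open_capture."
      || PySem.Str.startswith failure "payouts."
      || PySem.Str.startswith failure "ops.") then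
    "proof_artifact_blocked"
  else if failures.any (fun failure => PySem.Str.isIn "required for live" failure) then
    "live_inputs_blocked"
  else if failures.any (fun failure =>
      PySem.Str.isIn "placeholder for live route checks" failure
      || PySem.Str.isIn "decimal coordinate" failure) then
    "live_inputs_blocked"
  else if failures.any (fun failure => PySem.Str.isIn "live route checks skipped" failure) then
    "proof_artifact_blocked"
  else "live_route_blocked"

-- ===== PORT B =====  (transliteration of Source B: _rank, the min-fold loop, the rank→stage mapping)
def pvRank (failure : String) : Nat :=
  if PySem.Str.isIn "must be set in" failure || PySem.Str.isIn "still contains a placeholder" failure then 1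
  else if PySem.Str.startswith failure "contract_only proof"
      || PySem.Str.startswith failure "ops/launch-readiness/example.launch-proof.json"
      || PySem.Str.startswith failure "real launch proof"
      || PySem.Str.isIn "contains placeholder proof text" failure
      || PySem.Str.startswith failure "evidence."
      || PySem.Str.startswith failure "proof city_slug"
      || PySem.Str.startswith failure "city."
      || PySem.Str.startswith failure "capture."
      || PySem.Str.startswith failure "pipeline."
      || PySem.Str.startswith failure "meta_glasses."
      || PySem.Str.startswith failure "open_capture."
      || PySem.Str.startswith failure "payouts."
      || PySem.Str.startswith failure "ops." then 2
  else if PySem.Str.isIn "required for live" failure then 3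
  else if PySem.Str.isIn "placeholder for live route checks" failure
      || PySem.Str.isIn "decimal coordinate" failure then 4
  else if PySem.Str.isIn "live route checks skipped" failure then 5
  else 6

def readiness_stage_alt (failures : List String) : String :=
  if failures = [] then "ready"
  else
    let best := failures.foldl (fun best failure => min best (pvRank failure)) 6
    if best = 1 then "release_config_blocked"
    else if best = 2 ∨ best = 5 then "proof_artifact_blocked"
    else if best = 3 ∨ best = 4 then "live_inputs_blocked"
    else "live_route_blocked"

-- ===== PRECONDITION & SPEC =====
def Spec_readiness_stage (failures : List String) (out : String) : Prop := out = readiness_stage_alt failures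
instance (failures : List String) (out : String) : Decidable (Spec_readiness_stage failures out) := by unfold Spec_readiness_stage; infer_instance

-- ===== CLAIM (what is proved, stated in full; the proofs are below) =====
def Claim_equal_readiness_stage : Prop := ∀ (failures : List String), Dom_readiness_stage failures → Spec_readiness_stage failures (readiness_stage failures)

-- ===== LEMMAS AND PROOFS =====

theorem pvFold_le_init (xs : List String) (a : Nat) :
    xs.foldl (fun best failure => min best (pvRank failure)) a ≤ a := by
  induction xs generalizing a with
  | nil => simp
  | cons y ys ih =>
    simpa using le_trans (ih (min a (pvRank y))) (Nat.min_le_left _ _)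

theorem pvFold_le_rank (xs : List String) (a : Nat) {f : String} (h : f ∈ xs) :
    xs.foldl (fun best failure => min best (pvRank failure)) a ≤ pvRank f := by
  induction xs generalizing a with
  | nil => cases h
  | cons y ys ih =>
    rcases List.mem_cons.mp h with rfl | h'
    · simpa using le_trans (pvFold_le_init ys (min a (pvRank f))) (Nat.min_le_right _ _)
    · simpa using ih (min a (pvRank y)) h'

theorem pvLe_fold (xs : List String) (a k : Nat) (h : ∀ f ∈ xs, k ≤ pvRank f) (ha : k ≤ a) :
    k ≤ xs.foldl (fun best failure => min best (pvRank failure)) a := by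
  induction xs generalizing a with
  | nil => simpa
  | cons y ys ih =>
    simp only [List.foldl_cons]
    exact ih (min a (pvRank y)) (fun f hf => h f (List.mem_cons_of_mem _ hf))
      (le_min ha (h y List.mem_cons_self))

theorem pvFold_eq (xs : List String) (k : Nat) (hk : k ≤ 6)
    (hw : ∃ f ∈ xs, pvRank f = k) (hb : ∀ f ∈ xs, k ≤ pvRank f) :
    xs.foldl (fun best failure => min best (pvRank failure)) 6 = k := by
  rcases hw with ⟨f, hf, hr⟩
  exact le_antisymm (hr ▸ pvFold_le_rank xs 6 hf) (pvLe_fold xs 6 k hb hk)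

theorem readiness_stage_spec : Claim_equal_readiness_stage := by
  intro failures _
  unfold Spec_readiness_stage readiness_stage readiness_stage_alt
  by_cases hnil : failures = []
  · simp [hnil]
  · simp only [hnil, if_false]
    cases h1 : failures.any (fun failure =>
        PySem.Str.isIn "must be set in" failure || PySem.Str.isIn "still contains a placeholder" failure) with
    | true =>
      rcases List.any_eq_true.mp h1 with ⟨f, hf, hp⟩
      have hfold := pvFold_eq failures 1 (by omega)
        ⟨f, hf, by unfold pvRank; rw [if_pos hp]⟩
        (fun g _ => by unfold pvRank; split_ifs <;> omega)
      simp only [if_true, hfold]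
    | false =>
      have h1' := List.any_eq_false.mp h1
      simp only [Bool.false_eq_true, if_false]
      cases h2 : failures.any (fun failure =>
          PySem.Str.startswith failure "contract_only proof"
          || PySem.Str.startswith failure "ops/launch-readiness/example.launch-proof.json"
          || PySem.Str.startswith failure "real launch proof"
          || PySem.Str.isIn "contains placeholder proof text" failure
          || PySem.Str.startswith failure "evidence."
          || PySem.Str.startswith failure "proof city_slug"
          || PySem.Str.startswith failure "city."
          || PySem.Str.startswith failure "capture."
          || PySem.Str.startswith failure "pipeline."
          || PySem.Str.startswith failure "meta_glasses."
          || PySem.Str.startswith failure "open_capture."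
          || PySem.Str.startswith failure "payouts."
          || PySem.Str.startswith failure "ops.") with
      | true =>
        rcases List.any_eq_true.mp h2 with ⟨f, hf, hp⟩
        have hfold := pvFold_eq failures 2 (by omega)
          ⟨f, hf, by unfold pvRank; rw [if_neg (h1' f hf), if_pos hp]⟩
          (fun g hg => by
            have e1 := h1' g hg
            unfold pvRank; split_ifs <;> omega)
        simp only [if_true, hfold]; norm_num
      | false =>
        have h2' := List.any_eq_false.mp h2
        simp only [Bool.false_eq_true, if_false]
        cases h3 : failures.any (fun failure => PySem.Str.isIn "required for live" failure) with
        | true =>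
          rcases List.any_eq_true.mp h3 with ⟨f, hf, hp⟩
          have hfold := pvFold_eq failures 3 (by omega)
            ⟨f, hf, by unfold pvRank; rw [if_neg (h1' f hf), if_neg (h2' f hf), if_pos hp]⟩
            (fun g hg => by
              have e1 := h1' g hg; have e2 := h2' g hg
              unfold pvRank; split_ifs <;> omega)
          simp only [if_true, hfold]; norm_num
        | false =>
          have h3' := List.any_eq_false.mp h3
          simp only [Bool.false_eq_true, if_false]
          cases h4 : failures.any (fun failure =>
              PySem.Str.isIn "placeholder for live route checks" failure
              || PySem.Str.isIn "decimal coordinate" failure) with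
          | true =>
            rcases List.any_eq_true.mp h4 with ⟨f, hf, hp⟩
            have hfold := pvFold_eq failures 4 (by omega)
              ⟨f, hf, by
                unfold pvRank
                rw [if_neg (h1' f hf), if_neg (h2' f hf), if_neg (h3' f hf), if_pos hp]⟩
              (fun g hg => by
                have e1 := h1' g hg; have e2 := h2' g hg; have e3 := h3' g hg
                unfold pvRank; split_ifs <;> omega)
            simp only [if_true, hfold]; norm_num
          | false =>
            have h4' := List.any_eq_false.mp h4
            simp only [Bool.false_eq_true, if_false]
            cases h5 : failures.any (fun failure => PySem.Str.isIn "live route checks skipped" failure) with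
            | true =>
              rcases List.any_eq_true.mp h5 with ⟨f, hf, hp⟩
              have hfold := pvFold_eq failures 5 (by omega)
                ⟨f, hf, by
                  unfold pvRank
                  rw [if_neg (h1' f hf), if_neg (h2' f hf), if_neg (h3' f hf),
                    if_neg (h4' f hf), if_pos hp]⟩
                (fun g hg => by
                  have e1 := h1' g hg; have e2 := h2' g hg
                  have e3 := h3' g hg; have e4 := h4' g hg
                  unfold pvRank; split_ifs <;> omega)
              simp only [if_true, hfold]; norm_num
            | false =>
              have h5' := List.any_eq_false.mp h5
              have hfold := pvFold_eq failures 6 (by omega)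
                (by
                  rcases List.exists_mem_of_ne_nil failures hnil with ⟨f, hf⟩
                  refine ⟨f, hf, ?_⟩
                  unfold pvRank
                  rw [if_neg (h1' f hf), if_neg (h2' f hf), if_neg (h3' f hf),
                    if_neg (h4' f hf), if_neg (h5' f hf)])
                (fun g hg => by
                  have e1 := h1' g hg; have e2 := h2' g hg; have e3 := h3' g hg
                  have e4 := h4' g hg; have e5 := h5' g hg
                  unfold pvRank; split_ifs <;> omega)
              simp only [Bool.false_eq_true, if_false, hfold]; norm_num
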